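-- pv_equiv track=rewrite | github.com/SarBH/inteview_cake | google_practice_server_split_jobs.py | solution
-- ===== SOURCE A (Python) =====
-- def solution(A):
-- 	"""Your solution goes here."""
--
-- 	server1 = []
-- 	server2 = []
-- 	load1 = 0
-- 	load2 = 0
--
--
--
-- 	while A != []:
-- 		largest = A.pop(A.index(max(A)))
--
-- 		if load1 <= load2:
-- 			server1.append(largest)
-- 			load1 += largest
-- 		else:
-- 			server2.append(largest)
-- 			load2 += largest
--
-- 	return abs(load1 - load2)
-- ===== SOURCE B (Python) =====
-- def solution(A):
--     """Sort once descending, then one greedy pass assigning each job to the lighter server."""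
--     load1 = 0
--     load2 = 0
--     for x in sorted(A, reverse=True):
--         if load1 <= load2:
--             load1 += x
--         else:
--             load2 += x
--     return abs(load1 - load2)
-- ===== Notes on version B (the rewrite author's own statement) =====
-- stated objective: faster
-- what changed: Replaces the O(n^2) destructive loop (repeated max+index+pop on the list) with a single descending sort followed by one greedy pass over it; note A empties its argument list in place while B leaves it untouched (return values agree).
import Mathlib
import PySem

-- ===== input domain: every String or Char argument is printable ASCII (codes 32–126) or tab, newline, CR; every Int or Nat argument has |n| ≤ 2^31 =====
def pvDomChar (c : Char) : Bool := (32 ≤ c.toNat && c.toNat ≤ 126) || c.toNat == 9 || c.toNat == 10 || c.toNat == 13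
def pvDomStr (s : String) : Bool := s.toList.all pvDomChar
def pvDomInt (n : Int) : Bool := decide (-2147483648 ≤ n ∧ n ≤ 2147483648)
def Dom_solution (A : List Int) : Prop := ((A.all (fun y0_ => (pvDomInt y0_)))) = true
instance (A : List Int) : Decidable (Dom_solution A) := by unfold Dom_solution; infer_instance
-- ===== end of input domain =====

-- B replaces A's quadratic repeated max/index/pop loop by one descending sort and a single
-- greedy pass (asymptotically faster); A empties its argument list in place, B does not —
-- the equivalence proved here is about the return value only.

-- ===== PORT A =====
-- A's while loop: fuel = initial length (the loop removes one element per iteration, so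
-- fuel never runs out on a nonempty list; the fuel-0 branch mirrors the loop exit).
-- server1/server2 are carried exactly as in A (they do not affect the result).
def solutionLoop (fuel : Nat) (A server1 server2 : List Int) (load1 load2 : Int) : Int :=
  match fuel with
  | 0 => |load1 - load2|
  | fuel + 1 =>
    if A = [] then |load1 - load2|
    else
      match PySem.List.max? A (fun x => x) with
      | none => 0  -- unreachable: A ≠ []
      | some m =>
        match PySem.List.index? A m with
        | none => 0  -- unreachable: m ∈ A
        | some i =>
          match PySem.List.pop? A (Int.ofNat i) with
          | none => 0  -- unreachable: i < len(A)
          | some (largest, A') =>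
            if load1 ≤ load2 then
              solutionLoop fuel A' (server1 ++ [largest]) server2 (load1 + largest) load2
            else
              solutionLoop fuel A' server1 (server2 ++ [largest]) load1 (load2 + largest)

def solution (A : List Int) : Int :=
  solutionLoop A.length A [] [] 0 0

-- ===== PORT B =====
def solution_alt (A : List Int) : Int :=
  let p := (PySem.List.sorted A (fun x => x) true).foldl
    (fun (l : Int × Int) x => if l.1 ≤ l.2 then (l.1 + x, l.2) else (l.1, l.2 + x)) (0, 0)
  |p.1 - p.2|

-- ===== PRECONDITION & SPEC =====
def Spec_solution (A : List Int) (out : Int) : Prop := out = solution_alt A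
instance (A : List Int) (out : Int) : Decidable (Spec_solution A out) := by unfold Spec_solution; infer_instance

-- ===== CLAIM (what is proved, stated in full; the proofs are below) =====
def Claim_equal_solution : Prop := ∀ (A : List Int), Dom_solution A → Spec_solution A (solution A)

-- ===== LEMMAS AND PROOFS =====

-- the descending sort of A is its max followed by the descending sort of A minus that occurrence
lemma sorted_desc_cons (A : List Int) (m : Int) (i : Nat)
    (hm : PySem.List.max? A (fun x => x) = some m)
    (hi : PySem.List.index? A m = some i) :
    PySem.List.sorted A (fun x => x) true
      = m :: PySem.List.sorted (A.eraseIdx i) (fun x => x) true := by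
  obtain ⟨pre, suf, hA, hlen, _⟩ := (PySem.List.index?_eq_some_iff A m i).1 hi
  have herase : A.eraseIdx i = pre ++ suf := by
    subst hA hlen
    simp [List.eraseIdx_append_of_length_le (Nat.le_refl _)]
  have hperm1 : (PySem.List.sorted A (fun x => x) true).Perm A := PySem.List.sorted_perm ..
  have hperm2 : (m :: PySem.List.sorted (A.eraseIdx i) (fun x => x) true).Perm A := by
    refine List.Perm.trans (List.Perm.cons m (PySem.List.sorted_perm ..)) ?_
    rw [herase, hA]
    exact (List.perm_middle).symm
  have hmax : ∀ y ∈ A, y ≤ m := PySem.List.max?_isMax hm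
  have hs1 : List.Pairwise (fun a b : Int => b ≤ a) (PySem.List.sorted A (fun x => x) true) :=
    PySem.List.sorted_pairwise_rev ..
  have hs2 : List.Pairwise (fun a b : Int => b ≤ a)
      (m :: PySem.List.sorted (A.eraseIdx i) (fun x => x) true) := by
    constructor
    · intro y hy
      have : y ∈ A.eraseIdx i := (PySem.List.mem_sorted ..).1 hy
      exact hmax y (List.mem_of_mem_eraseIdx this)
    · exact PySem.List.sorted_pairwise_rev ..
  exact (hperm1.trans hperm2.symm).eq_of_pairwise (fun a b _ _ h1 h2 => le_antisymm h2 h1) hs1 hs2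

lemma solutionLoop_eq (fuel : Nat) : ∀ (A s1 s2 : List Int) (l1 l2 : Int),
    A.length ≤ fuel →
    solutionLoop fuel A s1 s2 l1 l2 =
      (let p := (PySem.List.sorted A (fun x => x) true).foldl
        (fun (l : Int × Int) x => if l.1 ≤ l.2 then (l.1 + x, l.2) else (l.1, l.2 + x)) (l1, l2)
      |p.1 - p.2|) := by
  induction fuel with
  | zero =>
    intro A s1 s2 l1 l2 h
    have : A = [] := List.length_eq_zero_iff.mp (Nat.le_zero.mp h)
    subst this
    simp [solutionLoop, PySem.List.sorted]
  | succ fuel ih =>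
    intro A s1 s2 l1 l2 h
    by_cases hA : A = []
    · subst hA; simp [solutionLoop, PySem.List.sorted]
    · obtain ⟨m, hm⟩ := Option.ne_none_iff_exists'.1
        ((PySem.List.max?_eq_none_iff A (fun x : Int => x)).not.2 hA)
      have hmem : m ∈ A := PySem.List.max?_mem hm
      obtain ⟨i, hi⟩ := Option.ne_none_iff_exists'.1
        ((Option.isSome_iff_ne_none).1 ((PySem.List.index?_isSome_iff A m).2 hmem))
      obtain ⟨hk, hget, -⟩ := PySem.List.getElem_of_index?_eq_some hi
      have hpop : PySem.List.pop? A (Int.ofNat i) = some (A[i], A.eraseIdx i) :=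
        PySem.List.pop?_natCast A i hk
      have hlen' : (A.eraseIdx i).length ≤ fuel := by
        rw [List.length_eraseIdx_of_lt hk]; omega
      have hsort := sorted_desc_cons A m i hm hi
      rw [show solutionLoop (fuel + 1) A s1 s2 l1 l2 =
        (if hA' : A = [] then |l1 - l2| else
          (if l1 ≤ l2 then
            solutionLoop fuel (A.eraseIdx i) (s1 ++ [A[i]]) s2 (l1 + A[i]) l2
          else
            solutionLoop fuel (A.eraseIdx i) s1 (s2 ++ [A[i]]) l1 (l2 + A[i]))) from by
        simp only [solutionLoop, hm, hi, hpop]; split <;> rfl]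
      rw [dif_neg hA]
      simp only [hsort, List.foldl_cons, hget]
      by_cases hle : l1 ≤ l2
      · rw [if_pos hle, ih _ _ _ _ _ hlen']; simp [hle]
      · rw [if_neg hle, ih _ _ _ _ _ hlen']; simp [hle]

-- ===== VERDICT (by name: the statement is the Claim_ definition above) =====
theorem solution_spec : Claim_equal_solution := by
  intro A _
  unfold Spec_solution solution solution_alt
  exact solutionLoop_eq A.length A [] [] 0 0 (Nat.le_refl _)
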